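-- pv_equiv track=rewrite | github.com/thu-coai/CrossWOZ | convlab2/policy/vhus/camrest/usermanager.py | query_goal_for_sys
-- ===== SOURCE A (Python) =====
-- informable_keys = ['address', 'area', 'food', 'name', 'phone', 'pricerange']
--
-- def query_goal_for_sys(slot, value, goal):
--     ret = None
--     goal_slot = slot if slot in informable_keys else 'Unknow'
--     if goal_slot != 'Unknow':
--         check = {'info': None}
--         for zone in check.keys():
--             dt = goal.get(zone, {})
--             if goal_slot in dt.keys():
--                 check[zone] = (dt[goal_slot].lower() == value.lower())
--         if True in check.values() or False in check.values():
--             # in constraint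
--             ret = 'InConstraint'
--             if True in check.values() and False in check.values():
--                 ret += '[C]'
--             elif True in check.values() and False not in check.values():
--                 ret += '[R]'
--             elif True not in check.values() and False in check.values():
--                 ret += '[W]'
--         elif goal_slot in goal.get('reqt', []):
--             # in Request
--             ret = 'InRequest'
--         else:
--             # not in goal
--             ret = 'NotInGoal'
--     elif goal_slot == 'Unknow':
--         ret = 'Unknow'
--     else:
--         ret = None
--     return ret
-- ===== SOURCE B (Python) =====
-- informable_keys = ['address', 'area', 'food', 'name', 'phone', 'pricerange']
--
-- def query_goal_for_sys(slot, value, goal):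
--     if slot not in informable_keys:
--         return 'Unknow'
--     verdict = 'NotInGoal'
--     for zone, content in goal.items():
--         if zone == 'info' and slot in content:
--             same = content[slot].lower() == value.lower()
--             return 'InConstraint[R]' if same else 'InConstraint[W]'
--         if zone == 'reqt' and slot in content:
--             verdict = 'InRequest'
--     return verdict
-- ===== Notes on version B (the rewrite author's own statement) =====
-- stated objective: alternative
-- what changed: Replaced A's check-dict accumulator, zone loop over it and True/False value scans by a single pass over goal.items() with an early return on an 'info' hit and a verdict variable for 'reqt'; no dict.get lookups remain.
import Mathlib
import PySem

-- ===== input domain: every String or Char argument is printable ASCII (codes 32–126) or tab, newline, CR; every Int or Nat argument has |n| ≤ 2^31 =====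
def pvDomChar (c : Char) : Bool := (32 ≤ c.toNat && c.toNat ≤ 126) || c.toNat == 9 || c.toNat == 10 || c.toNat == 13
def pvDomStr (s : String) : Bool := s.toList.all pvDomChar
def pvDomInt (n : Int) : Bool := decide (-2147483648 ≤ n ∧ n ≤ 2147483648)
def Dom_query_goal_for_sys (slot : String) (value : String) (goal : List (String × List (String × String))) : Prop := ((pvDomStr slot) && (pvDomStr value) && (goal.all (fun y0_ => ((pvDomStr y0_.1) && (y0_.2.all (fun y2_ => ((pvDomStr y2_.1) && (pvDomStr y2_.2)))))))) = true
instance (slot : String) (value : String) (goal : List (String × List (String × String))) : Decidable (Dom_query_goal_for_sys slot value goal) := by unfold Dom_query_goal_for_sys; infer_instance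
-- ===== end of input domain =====

-- B replaces A's check-dict accumulator, zone loop and True/False value scans by one pass over
-- goal's items with an early return on an 'info' hit and a verdict variable for 'reqt'; objective: alternative.

-- ===== PORT A =====
def informable_keys : List String := ["address", "area", "food", "name", "phone", "pricerange"]

def query_goal_for_sys (slot : String) (value : String) (goal : List (String × List (String × String))) : Option String :=
  let ret : Option String := none
  let goal_slot := if informable_keys.contains slot then slot else "Unknow"
  if goal_slot ≠ "Unknow" then
    let check : PySem.Dict String (Option Bool) := PySem.Dict.mk [("info", none)]
    -- 'for zone in check.keys(): …' over the fixed one-key dict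
    let check := (PySem.Dict.keys check).foldl (fun ch zone =>
      let dt := PySem.Dict.getD (PySem.Dict.mk goal) zone []
      if (PySem.Dict.keys (PySem.Dict.mk dt)).contains goal_slot then
        -- dt[goal_slot] is guarded by the key test above, so the KeyError default "" is never used
        PySem.Dict.insert ch zone (some (PySem.Str.lower (PySem.Dict.getD (PySem.Dict.mk dt) goal_slot "") == PySem.Str.lower value))
      else ch) check
    let vals := PySem.Dict.values check
    if vals.contains (some true) || vals.contains (some false) then
      let r := "InConstraint"
      if vals.contains (some true) && vals.contains (some false) then some (r ++ "[C]")
      else if vals.contains (some true) && !vals.contains (some false) then some (r ++ "[R]")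
      else if !vals.contains (some true) && vals.contains (some false) then some (r ++ "[W]")
      else some r
    else if (PySem.Dict.keys (PySem.Dict.mk (PySem.Dict.getD (PySem.Dict.mk goal) "reqt" []))).contains goal_slot then
      some "InRequest"
    else
      some "NotInGoal"
  else if goal_slot == "Unknow" then some "Unknow"
  else ret

-- ===== PORT B =====
-- the 'for zone, content in goal.items():' loop of Source B, with verdict as the accumulator
def qgfs_scan (slot : String) (value : String) : List (String × List (String × String)) → String → Option String
  | [], verdict => some verdict
  | (zone, content) :: rest, verdict =>
    if zone == "info" && (content.map Prod.fst).contains slot then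
      let same := PySem.Str.lower (PySem.Dict.getD (PySem.Dict.mk content) slot "") == PySem.Str.lower value
      if same then some "InConstraint[R]" else some "InConstraint[W]"
    else if zone == "reqt" && (content.map Prod.fst).contains slot then
      qgfs_scan slot value rest "InRequest"
    else
      qgfs_scan slot value rest verdict

def query_goal_for_sys_alt (slot : String) (value : String) (goal : List (String × List (String × String))) : Option String :=
  if !informable_keys.contains slot then some "Unknow"
  else qgfs_scan slot value goal "NotInGoal"

-- ===== PRECONDITION & SPEC =====
-- Pre_ excludes association lists whose zone keys repeat: a Python dict cannot carry duplicate keys,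
-- and on such lists A's first-match dict lookup vs B's scan order is an accidental corner.
def Pre_query_goal_for_sys (slot : String) (value : String) (goal : List (String × List (String × String))) : Prop :=
  (goal.map Prod.fst).Nodup
instance (slot : String) (value : String) (goal : List (String × List (String × String))) : Decidable (Pre_query_goal_for_sys slot value goal) := by unfold Pre_query_goal_for_sys; infer_instance

def pvWitness_query_goal_for_sys : String × String × (List (String × List (String × String))) :=
  ("area", "north", [("info", [("area", "North")]), ("reqt", [("phone", "")])])

def Spec_query_goal_for_sys (slot : String) (value : String) (goal : List (String × List (String × String))) (out : Option String) : Prop := out = query_goal_for_sys_alt slot value goal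
instance (slot : String) (value : String) (goal : List (String × List (String × String))) (out : Option String) : Decidable (Spec_query_goal_for_sys slot value goal out) := by unfold Spec_query_goal_for_sys; infer_instance

-- ===== CLAIM =====
def Claim_equal_query_goal_for_sys : Prop := ∀ (slot : String) (value : String) (goal : List (String × List (String × String))), Dom_query_goal_for_sys slot value goal → Pre_query_goal_for_sys slot value goal → Spec_query_goal_for_sys slot value goal (query_goal_for_sys slot value goal)

-- ===== LEMMAS AND PROOFS =====
theorem unknow_not_informable (slot : String) (h : informable_keys.contains slot = true) : slot ≠ "Unknow" := by
  intro heq; subst heq; exact absurd h (by decide)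

theorem get?_mk_none_iff {α : Type} (l : List (String × α)) (k : String) :
    (PySem.Dict.mk l).get? k = none ↔ (List.map (fun x => x.1) l).contains k = false := by
  induction l with
  | nil => simp [PySem.Dict.get?]
  | cons p t ih =>
      rw [PySem.Dict.get?_mk_cons]
      by_cases hpk : p.1 = k
      · subst hpk; simp
      · have hb : (p.1 == k) = false := by simp [hpk]
        have hb' : (k == p.1) = false := by simp [Ne.symm hpk]
        simp [hb, hb', ih]

-- B-side characterisation helpers (proof-only)
def qgfsInfo (goal : List (String × List (String × String))) : List (String × String) :=
  PySem.Dict.getD (PySem.Dict.mk goal) "info" []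
def qgfsReqt (goal : List (String × List (String × String))) : List (String × String) :=
  PySem.Dict.getD (PySem.Dict.mk goal) "reqt" []

theorem getD_of_absent {α : Type} (l : List (String × α)) (k : String) (d : α)
    (h : (List.map (fun x => x.1) l).contains k = false) :
    PySem.Dict.getD (PySem.Dict.mk l) k d = d := by
  rw [PySem.Dict.getD_eq_get?_getD, (get?_mk_none_iff l k).mpr h]; rfl

theorem qgfs_scan_spec (slot value : String) (goal : List (String × List (String × String)))
    (v : String) (hnd : (goal.map Prod.fst).Nodup) :
    qgfs_scan slot value goal v =
      if ((qgfsInfo goal).map Prod.fst).contains slot then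
        (if PySem.Str.lower (PySem.Dict.getD (PySem.Dict.mk (qgfsInfo goal)) slot "") == PySem.Str.lower value
         then some "InConstraint[R]" else some "InConstraint[W]")
      else if ((qgfsReqt goal).map Prod.fst).contains slot then some "InRequest"
      else some v := by
  induction goal generalizing v with
  | nil => simp [qgfs_scan, qgfsInfo, qgfsReqt, PySem.Dict.getD, PySem.Dict.get?]
  | cons p rest ih =>
      obtain ⟨zone, content⟩ := p
      have hnd' : (rest.map Prod.fst).Nodup := (List.nodup_cons.mp hnd).2
      have hzrest : zone ∉ rest.map Prod.fst := (List.nodup_cons.mp hnd).1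
      by_cases hz : zone = "info"
      · subst hz
        have hinfo : qgfsInfo (("info", content) :: rest) = content := by
          simp [qgfsInfo, PySem.Dict.getD_eq_get?_getD, PySem.Dict.get?_mk_cons]
        have hreqt : qgfsReqt (("info", content) :: rest) = qgfsReqt rest := by
          simp [qgfsReqt, PySem.Dict.getD_eq_get?_getD, PySem.Dict.get?_mk_cons]
        by_cases hc : (content.map Prod.fst).contains slot = true
        · simp only [qgfs_scan, hinfo, hreqt, hc]
          simp
        · have hcf : (content.map Prod.fst).contains slot = false := by
            rw [Bool.not_eq_true] at hc; exact hc
          have hirest : ((qgfsInfo rest).map Prod.fst).contains slot = false := by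
            have : qgfsInfo rest = [] := by
              apply getD_of_absent
              simpa [List.contains_iff_mem] using hzrest
            simp [this]
          have e1 : (("info" : String) == "info") = true := rfl
          have e2 : (("info" : String) == "reqt") = false := rfl
          have hstep : qgfs_scan slot value (("info", content) :: rest) v = qgfs_scan slot value rest v := by
            simp only [qgfs_scan, e1, Bool.true_and, hcf, Bool.false_eq_true, if_false, e2,
              Bool.false_and]
          rw [hstep, ih v hnd', hirest, hinfo, hreqt, hcf]
          simp
      · by_cases hr : zone = "reqt"
        · subst hr
          have hinfo : qgfsInfo (("reqt", content) :: rest) = qgfsInfo rest := by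
            simp [qgfsInfo, PySem.Dict.getD_eq_get?_getD, PySem.Dict.get?_mk_cons]
          have hreqt : qgfsReqt (("reqt", content) :: rest) = content := by
            simp [qgfsReqt, PySem.Dict.getD_eq_get?_getD, PySem.Dict.get?_mk_cons]
          by_cases hc : (content.map Prod.fst).contains slot = true
          · simp only [qgfs_scan, hinfo, hreqt, hc]
            rw [ih "InRequest" hnd']
            simp
          · have hcf : (content.map Prod.fst).contains slot = false := by
              rw [Bool.not_eq_true] at hc; exact hc
            have hrrest : ((qgfsReqt rest).map Prod.fst).contains slot = false := by
              have : qgfsReqt rest = [] := by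
                apply getD_of_absent
                simpa [List.contains_iff_mem] using hzrest
              simp [this]
            simp only [qgfs_scan, hinfo, hreqt, hcf]
            rw [ih v hnd', hrrest]
            simp
        · have hinfo : qgfsInfo ((zone, content) :: rest) = qgfsInfo rest := by
            simp [qgfsInfo, PySem.Dict.getD_eq_get?_getD, PySem.Dict.get?_mk_cons, hz]
          have hreqt : qgfsReqt ((zone, content) :: rest) = qgfsReqt rest := by
            simp [qgfsReqt, PySem.Dict.getD_eq_get?_getD, PySem.Dict.get?_mk_cons, hr]
          have hz' : (zone == "info") = false := by simp [hz]
          have hr' : (zone == "reqt") = false := by simp [hr]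
          simp only [qgfs_scan, hinfo, hreqt, hz', hr', Bool.false_and, Bool.false_eq_true, if_false]
          exact ih v hnd'

-- ===== VERDICT =====
theorem query_goal_for_sys_spec : Claim_equal_query_goal_for_sys := by
  intro slot value goal _ hpre
  unfold Spec_query_goal_for_sys query_goal_for_sys query_goal_for_sys_alt
  by_cases hs : informable_keys.contains slot = true
  · have hne := unknow_not_informable slot hs
    simp only [hs, if_true, Bool.not_true, ne_eq, hne, not_false_eq_true]
    rw [qgfs_scan_spec slot value goal "NotInGoal" hpre]
    simp only [qgfsInfo, qgfsReqt, PySem.Dict.keys, List.map, List.foldl]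
    by_cases hc : (List.map (fun x => x.1) (PySem.Dict.getD (PySem.Dict.mk goal) "info" [])).contains slot = true
    · simp only [hc, if_true]
      by_cases hv : PySem.Str.lower (PySem.Dict.getD (PySem.Dict.mk (PySem.Dict.getD (PySem.Dict.mk goal) "info" [])) slot "") = PySem.Str.lower value <;>
        simp [hv, PySem.Dict.insert, PySem.Dict.values]
    · have hcf : (List.map (fun x => x.1) (PySem.Dict.getD (PySem.Dict.mk goal) "info" [])).contains slot = false := by
        rw [Bool.not_eq_true] at hc; exact hc
      simp only [hcf, Bool.false_eq_true, if_false]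
      simp [PySem.Dict.values]
  · rw [Bool.not_eq_true] at hs
    simp only [hs, Bool.false_eq_true, if_false]
    simp
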